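-- pv_equiv track=rewrite | github.com/daniel-reich/ubiquitous-fiesta | Y4gwcGfcGb3SKz6Tu_15.py | max_separator
-- ===== SOURCE A (Python) =====
-- def max_separator(lst):
--
--     a = list(lst)
--     c,d,e,f,g=[],[],[],[],[]
--     for p in range(len(a)):
--         k = str("c"+str(p))
--         k= []
--         c.append(k)
--     for i in range(len(c)):
--         c[i].append(a[i])
--         for j in range(i+1,len(c)):
--             c[i].append(a[j])
--             if a[j] == a[i]:
--                 d.append(c[i])
--                 break
--     if len(d)==0:
--         return []
--     ds = sorted(d,key=len,reverse=True)
--     for i in ds: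
--         e.append(len(i))
--     f.append(e[0])
--     for i in range(1,len(e)):
--         if (e[i-1])!=(e[i]):
--             break
--         f.append(e[i])
--     for i in range(len(f)):
--         g.append(ds[i])
--     result = []
--     for i in range(len(g)):
--         result.append(sorted(g)[i][0])
--     return result
-- ===== SOURCE B (Python) =====
-- def max_separator(lst):
--     last = {}
--     pairs = []
--     for j, v in enumerate(lst):
--         if v in last:
--             pairs.append((last[v], j))
--         last[v] = j
--     if not pairs:
--         return []
--     best = max(j - i for i, j in pairs)
--     return sorted(lst[i] for i, j in pairs if j - i == best)
-- ===== Notes on version B (the rewrite author's own statement) =====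
-- stated objective: faster
-- what changed: One pass with a last-seen-index dict yields each (previous occurrence, next occurrence) pair directly, the maximal gap is taken with max, and only the start values of maximal-gap pairs are sorted - replacing A's quadratic construction of all growing prefix segments, its stable sort of whole segments by length and its repeated re-sorting of the winners.
import Mathlib
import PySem

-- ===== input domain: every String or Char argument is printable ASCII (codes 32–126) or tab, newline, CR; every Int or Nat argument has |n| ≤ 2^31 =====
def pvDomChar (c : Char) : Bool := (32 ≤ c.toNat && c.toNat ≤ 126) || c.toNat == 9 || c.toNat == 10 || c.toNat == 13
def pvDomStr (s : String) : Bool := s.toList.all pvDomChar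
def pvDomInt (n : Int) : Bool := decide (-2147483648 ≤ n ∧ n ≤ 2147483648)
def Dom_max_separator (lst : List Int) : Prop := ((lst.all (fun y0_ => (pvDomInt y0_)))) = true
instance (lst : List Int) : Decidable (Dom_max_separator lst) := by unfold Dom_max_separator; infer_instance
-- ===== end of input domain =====

-- B replaces A's quadratic prefix-segment construction by one dict pass over the list that emits
-- (previous-occurrence, occurrence) index pairs, takes the maximal gap, and sorts only the start
-- values of the maximal-gap pairs (objective: faster).

-- ===== PORT A =====
-- inner 'for j in range(i+1, len(c))' loop: extends the segment c[i], returns it at the first later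
-- equal element ('break'), none if the loop runs out without a match
def innerA (a : List Int) (ai : Int) : List Int → List Int → Option (List Int)
  | [], _seg => none
  | j :: js, seg =>
    let seg' := seg ++ [PySem.List.pyGetD a j 0]
    if PySem.List.pyGetD a j 0 = ai then some seg' else innerA a ai js seg'

-- the 'for i in range(1, len(e))' loop with its break
def floopA (e : List Int) : List Int → List Int → List Int
  | [], f => f
  | i :: is, f =>
    if PySem.List.pyGetD e (i-1) 0 ≠ PySem.List.pyGetD e i 0 then f
    else floopA e is (f ++ [PySem.List.pyGetD e i 0])

def max_separator (lst : List Int) : List Int :=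
  let a := lst
  -- first loop: c becomes a list of len(a) fresh empty lists (the string k is dead, immediately overwritten)
  let c := (PySem.List.pyRange 0 (a.length : Int) 1).foldl (fun c _p => c ++ [([] : List Int)]) []
  -- second loop: c[i] gathers a[i..]; at the first later equal element c[i] is appended to d and the
  -- inner loop breaks; c[i] is never mutated after that, so d's entries are the final segment values
  let d := (PySem.List.pyRange 0 (c.length : Int) 1).foldl
    (fun d i =>
      match innerA a (PySem.List.pyGetD a i 0) (PySem.List.pyRange (i+1) (c.length : Int) 1)
          [PySem.List.pyGetD a i 0] with
      | some s => d ++ [s]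
      | none => d) []
  if d.length = 0 then []
  else
    let ds := PySem.List.sorted d (fun s => (s.length : Int)) true
    let e := ds.foldl (fun e i => e ++ [(i.length : Int)]) []
    let f := floopA e (PySem.List.pyRange 1 (e.length : Int) 1) [PySem.List.pyGetD e 0 0]
    let g := (PySem.List.pyRange 0 (f.length : Int) 1).foldl (fun g i => g ++ [PySem.List.pyGetD ds i []]) []
    (PySem.List.pyRange 0 (g.length : Int) 1).foldl
      (fun r i => r ++ [PySem.List.pyGetD (PySem.List.pyGetD (PySem.List.sorted g (fun x => x) false) i []) 0 0]) []

-- ===== PORT B =====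
-- one step of B's dict pass: jv = (index j, value v)
def bstep (st : PySem.Dict Int Int × List (Int × Int)) (jv : Int × Int) :
    PySem.Dict Int Int × List (Int × Int) :=
  let pairs := if st.1.contains jv.2 then st.2 ++ [(st.1.getD jv.2 0, jv.1)] else st.2
  (st.1.insert jv.2 jv.1, pairs)

def max_separator_alt (lst : List Int) : List Int :=
  let st := (PySem.List.enumerate lst 0).foldl bstep (PySem.Dict.empty, [])
  let pairs := st.2
  if pairs = [] then []
  else
    -- max(...) over a list guarded to be nonempty
    let best := (PySem.List.max? (pairs.map (fun p : Int × Int => p.2 - p.1)) (fun x => x)).getD 0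
    PySem.List.sorted ((pairs.filter (fun p => p.2 - p.1 == best)).map
      (fun p => PySem.List.pyGetD lst p.1 0)) (fun x => x) false

-- ===== PRECONDITION & SPEC =====
def Spec_max_separator (lst : List Int) (out : List Int) : Prop := out = max_separator_alt lst
instance (lst : List Int) (out : List Int) : Decidable (Spec_max_separator lst out) := by unfold Spec_max_separator; infer_instance

-- ===== CLAIM (what is proved, stated in full; the proofs are below) =====
def Claim_equal_max_separator : Prop := ∀ (lst : List Int), Dom_max_separator lst → Spec_max_separator lst (max_separator lst)

-- ===== LEMMAS AND PROOFS =====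

-- the Decidable-instance argument of sorted/max? is proof-irrelevant
theorem sorted_instIrrel {α κ : Type} [LT κ] (d1 d2 : DecidableLT κ) (xs : List α) (key : α → κ) (rev : Bool) :
    @PySem.List.sorted α κ _ d1 xs key rev = @PySem.List.sorted α κ _ d2 xs key rev := by
  congr 1

-- generic list facts specific to the loop shapes of the two ports
theorem foldl_match_filterMap {α β : Type} (h : α → Option β) (g : List β → α → List β)
    (hg : ∀ d i, g d i = match h i with | some s => d ++ [s] | none => d) :
    ∀ (l : List α) (init : List β), l.foldl g init = init ++ l.filterMap h := by
  intro l
  induction l with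
  | nil => intro init; simp
  | cons x xs ih =>
    intro init
    rw [List.foldl_cons, hg, ih, List.filterMap_cons]
    cases h x <;> simp

theorem map_getD_range {α : Type} (l : List α) (d : α) :
    ∀ (k : Nat), k ≤ l.length → (List.range k).map (fun i => l.getD i d) = l.take k := by
  intro k
  induction k with
  | zero => intro _; simp
  | succ k ih =>
    intro hk
    rw [List.range_succ, List.map_append, ih (by omega), List.take_add_one]
    have : k < l.length := by omega
    simp [List.getElem?_eq_getElem this]

theorem takeWhile_eq_filter_of_pairwise {α : Type} (key : α → Int) (M : Int) :
    ∀ (l : List α), l.Pairwise (fun a b => key b ≤ key a) → (∀ x ∈ l, key x ≤ M) →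
      l.takeWhile (fun s => key s == M) = l.filter (fun s => key s == M) := by
  intro l
  induction l with
  | nil => intro _ _; simp
  | cons x xs ih =>
    intro hp hM
    rcases List.pairwise_cons.mp hp with ⟨hx, hxs⟩
    by_cases hxM : key x = M
    · have h1 : (key x == M) = true := by simp [hxM]
      rw [List.takeWhile_cons, List.filter_cons, h1]
      simp [ih hxs (fun y hy => hM y (List.mem_cons_of_mem _ hy))]
    · have h1 : (key x == M) = false := by simp [hxM]
      rw [List.takeWhile_cons, List.filter_cons, h1]
      simp only [Bool.false_eq_true, if_false]
      rw [List.filter_eq_nil_iff.mpr]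
      intro y hy
      have h2 : key y ≤ key x := hx y hy
      have h3 : key x < M := lt_of_le_of_ne (hM x (List.mem_cons_self)) hxM
      simp only [beq_iff_eq]
      omega

theorem head_le_of_lex_le (s t : List Int) (hs : s ≠ []) (ht : t ≠ []) (h : s ≤ t) :
    s.getD 0 0 ≤ t.getD 0 0 := by
  cases s with
  | nil => exact absurd rfl hs
  | cons x s' =>
    cases t with
    | nil => exact absurd rfl ht
    | cons y t' =>
      rcases lt_or_eq_of_le h with h | h
      · rcases List.cons_lt_cons_iff.mp h with h | ⟨h, _⟩
        · simpa using le_of_lt h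
        · simp [h]
      · cases h; simp

theorem find?_range'_eq_some (p : Nat → Bool) :
    ∀ (k s j : Nat), ((List.range' s k).find? p = some j ↔
      (s ≤ j ∧ j < s + k ∧ p j = true ∧ ∀ m, s ≤ m → m < j → p m = false)) := by
  intro k
  induction k with
  | zero => intro s j; simp; omega
  | succ k ih =>
    intro s j
    rw [List.range'_succ, List.find?_cons]
    cases hs : p s
    · rw [ih (s+1) j]
      constructor
      · rintro ⟨h1, h2, h3, h4⟩
        exact ⟨by omega, by omega, h3, fun m hm1 hm2 => by
          rcases Nat.eq_or_lt_of_le hm1 with rfl | hm1'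
          · exact hs
          · exact h4 m hm1' hm2⟩
      · rintro ⟨h1, h2, h3, h4⟩
        have hsj : s ≠ j := by rintro rfl; rw [hs] at h3; cases h3
        exact ⟨by omega, by omega, h3, fun m hm1 hm2 => h4 m (by omega) hm2⟩
    · constructor
      · rintro h; cases h
        exact ⟨le_refl _, by omega, hs, fun m hm1 hm2 => by omega⟩
      · rintro ⟨h1, h2, h3, h4⟩
        have hsj : s = j := by
          by_contra hne
          have : p s = false := h4 s (le_refl _) (by omega)
          rw [hs] at this; cases this
        rw [hsj]

theorem find?_revRange_eq_some (p : Nat → Bool) :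
    ∀ (n i : Nat), ((List.range n).reverse.find? p = some i ↔
      (i < n ∧ p i = true ∧ ∀ m, i < m → m < n → p m = false)) := by
  intro n
  induction n with
  | zero => intro i; simp
  | succ n ih =>
    intro i
    rw [List.range_succ, List.reverse_append]
    simp only [List.reverse_cons, List.reverse_nil, List.nil_append, List.singleton_append,
      List.find?_cons]
    cases hn : p n
    · rw [ih i]
      constructor
      · rintro ⟨h1, h2, h3⟩
        refine ⟨by omega, h2, fun m hm1 hm2 => ?_⟩
        rcases Nat.lt_succ_iff_lt_or_eq.mp hm2 with hm2' | rfl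
        · exact h3 m hm1 hm2'
        · exact hn
      · rintro ⟨h1, h2, h3⟩
        have : i ≠ n := by rintro rfl; rw [hn] at h2; cases h2
        exact ⟨by omega, h2, fun m hm1 hm2 => h3 m hm1 (by omega)⟩
    · constructor
      · rintro h; cases h
        exact ⟨by omega, hn, fun m hm1 hm2 => by omega⟩
      · rintro ⟨h1, h2, h3⟩
        have hin : n = i := by
          by_contra hne
          have : p n = false := h3 n (by omega) (by omega)
          rw [hn] at this; cases this
        rw [hin]

-- the (first index, its next equal index) pairs, in two traversal orders
def nxtN (a : List Int) (i : Nat) : Option Nat :=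
  (List.range a.length).find? (fun j => decide (i < j) && (a.getD j 0 == a.getD i 0))

def prevN (a : List Int) (j : Nat) : Option Nat :=
  (List.range j).reverse.find? (fun i => a.getD i 0 == a.getD j 0)

def pairsA (a : List Int) : List (Nat × Nat) :=
  (List.range a.length).filterMap (fun i => (nxtN a i).map (fun j => (i, j)))

def pairsB (a : List Int) : List (Nat × Nat) :=
  (List.range a.length).filterMap (fun j => (prevN a j).map (fun i => (i, j)))

def segOf (a : List Int) (p : Nat × Nat) : List Int := (a.drop p.1).take (p.2 + 1 - p.1)

def isPair (a : List Int) (i j : Nat) : Prop :=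
  i < j ∧ j < a.length ∧ a.getD j 0 = a.getD i 0 ∧ ∀ m, i < m → m < j → a.getD m 0 ≠ a.getD i 0

theorem nxtN_eq_some_iff (a : List Int) (i j : Nat) : nxtN a i = some j ↔ isPair a i j := by
  unfold nxtN isPair
  rw [List.range_eq_range', find?_range'_eq_some]
  constructor
  · rintro ⟨-, h2, h3, h4⟩
    simp only [Bool.and_eq_true, decide_eq_true_eq, beq_iff_eq] at h3
    refine ⟨h3.1, by omega, h3.2, fun m hm1 hm2 hme => ?_⟩
    have hpm : (decide (i < m) && (a.getD m 0 == a.getD i 0)) = true := by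
      simp only [hm1, decide_true, Bool.true_and, beq_iff_eq]; exact hme
    rw [h4 m (by omega) hm2] at hpm
    cases hpm
  · rintro ⟨h1, h2, h3, h4⟩
    refine ⟨by omega, by omega,
      by simp only [h1, decide_true, Bool.true_and, beq_iff_eq]; exact h3, fun m _ hm2 => ?_⟩
    by_cases him : i < m
    · have := h4 m him hm2
      simp only [Bool.and_eq_false_iff, beq_eq_false_iff_ne, ne_eq]
      exact Or.inr this
    · simp only [Bool.and_eq_false_iff, decide_eq_false_iff_not]
      exact Or.inl him

theorem nxtN_eq_none_iff (a : List Int) (i : Nat) :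
    nxtN a i = none ↔ ∀ j, i < j → j < a.length → a.getD j 0 ≠ a.getD i 0 := by
  unfold nxtN
  rw [List.find?_eq_none]
  constructor
  · intro h j hij hj he
    have := h j (List.mem_range.mpr hj)
    apply this
    simp only [hij, decide_true, Bool.true_and, beq_iff_eq]; exact he
  · intro h j hj
    simp only [Bool.and_eq_true, decide_eq_true_eq, beq_iff_eq, not_and]
    intro hij
    exact fun he => h j hij (List.mem_range.mp hj) he

theorem prevN_eq_some_iff (a : List Int) (i j : Nat) (hj : j < a.length) :
    prevN a j = some i ↔ isPair a i j := by
  unfold prevN isPair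
  rw [find?_revRange_eq_some]
  constructor
  · rintro ⟨h1, h2, h3⟩
    simp only [beq_iff_eq] at h2
    refine ⟨h1, hj, h2.symm, fun m hm1 hm2 hme => ?_⟩
    have hpm : (a.getD m 0 == a.getD j 0) = true := by
      simp only [beq_iff_eq]; rw [hme]; exact h2
    rw [h3 m hm1 hm2] at hpm
    cases hpm
  · rintro ⟨h1, h2, h3, h4⟩
    refine ⟨h1, by simp only [beq_iff_eq]; exact h3.symm, fun m hm1 hm2 => ?_⟩
    have h5 := h4 m hm1 hm2
    simp only [beq_eq_false_iff_ne, ne_eq]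
    intro he
    exact h5 (by rw [he, h3])

theorem prevN_eq_none_iff (a : List Int) (j : Nat) :
    prevN a j = none ↔ ∀ i, i < j → a.getD i 0 ≠ a.getD j 0 := by
  unfold prevN
  rw [List.find?_eq_none]
  constructor
  · intro h i hij he
    have := h i (by simp [hij])
    apply this
    simp only [beq_iff_eq]; exact he
  · intro h i hi
    have hi' : i < j := by simpa using hi
    simp only [beq_iff_eq]
    exact h i hi'

theorem mem_pairsA (a : List Int) (p : Nat × Nat) : p ∈ pairsA a ↔ isPair a p.1 p.2 := by
  obtain ⟨i, j⟩ := p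
  simp only [pairsA, List.mem_filterMap, List.mem_range, Option.map_eq_some_iff]
  constructor
  · rintro ⟨i', hi', j', hj', he⟩
    obtain ⟨rfl, rfl⟩ := Prod.mk.injEq .. ▸ he
    exact (nxtN_eq_some_iff a i' j').mp hj'
  · intro h
    have h' := h
    obtain ⟨h1, h2, -, -⟩ := h'
    exact ⟨i, by omega, j, (nxtN_eq_some_iff a i j).mpr h, rfl⟩

theorem mem_pairsB (a : List Int) (p : Nat × Nat) : p ∈ pairsB a ↔ isPair a p.1 p.2 := by
  obtain ⟨i, j⟩ := p
  simp only [pairsB, List.mem_filterMap, List.mem_range, Option.map_eq_some_iff]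
  constructor
  · rintro ⟨j', hj', i', hi', he⟩
    obtain ⟨rfl, rfl⟩ := Prod.mk.injEq .. ▸ he
    exact (prevN_eq_some_iff a i' j' hj').mp hi'
  · intro h
    have h' := h
    obtain ⟨h1, h2, -, -⟩ := h'
    exact ⟨j, h2, i, (prevN_eq_some_iff a i j h2).mpr h, rfl⟩

theorem nodup_pairsA (a : List Int) : (pairsA a).Nodup := by
  apply List.Nodup.filterMap _ (List.nodup_range)
  intro x y c hx hy
  simp only [Option.mem_def, Option.map_eq_some_iff] at hx hy
  obtain ⟨jx, -, hcx⟩ := hx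
  obtain ⟨jy, -, hcy⟩ := hy
  have h1 : x = c.1 := by rw [← hcx]
  have h2 : y = c.1 := by rw [← hcy]
  rw [h1, h2]

theorem nodup_pairsB (a : List Int) : (pairsB a).Nodup := by
  apply List.Nodup.filterMap _ (List.nodup_range)
  intro x y c hx hy
  simp only [Option.mem_def, Option.map_eq_some_iff] at hx hy
  obtain ⟨ix, -, hcx⟩ := hx
  obtain ⟨iy, -, hcy⟩ := hy
  have h1 : x = c.2 := by rw [← hcx]
  have h2 : y = c.2 := by rw [← hcy]
  rw [h1, h2]

theorem pairsA_perm_pairsB (a : List Int) : (pairsA a).Perm (pairsB a) := by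
  apply List.perm_of_nodup_nodup_toFinset_eq (nodup_pairsA a) (nodup_pairsB a)
  ext p
  simp [List.mem_toFinset, mem_pairsA, mem_pairsB]

-- A-side: the inner loop finds exactly the first later equal element
theorem innerA_eq_none (a : List Int) (x : Int) :
    ∀ (t k : Nat) (seg : List Int), t = a.length - k →
      (∀ j, k ≤ j → j < a.length → a.getD j 0 ≠ x) →
      innerA a x (PySem.List.pyRange (k : Int) (a.length : Int) 1) seg = none := by
  intro t
  induction t with
  | zero =>
    intro k seg ht h
    rw [PySem.List.pyRange_one_eq_nil (by exact_mod_cast Nat.le_of_sub_eq_zero ht.symm)]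
    rfl
  | succ t ih =>
    intro k seg ht h
    have hk : k < a.length := by omega
    rw [PySem.List.pyRange_one_cons (by exact_mod_cast hk)]
    simp only [innerA, PySem.List.pyGetD_natCast]
    rw [if_neg (h k (le_refl _) hk)]
    have hcast : (k : Int) + 1 = ((k + 1 : Nat) : Int) := by push_cast; ring
    rw [hcast]
    exact ih (k+1) _ (by omega) (fun j hj1 hj2 => h j (by omega) hj2)

theorem innerA_eq_some (a : List Int) (x : Int) :
    ∀ (t k : Nat) (seg : List Int) (j0 : Nat), t = j0 - k → k ≤ j0 → j0 < a.length →
      a.getD j0 0 = x → (∀ m, k ≤ m → m < j0 → a.getD m 0 ≠ x) →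
      innerA a x (PySem.List.pyRange (k : Int) (a.length : Int) 1) seg
        = some (seg ++ (a.drop k).take (j0 + 1 - k)) := by
  intro t
  induction t with
  | zero =>
    intro k seg j0 ht hkj hj0 hx hmin
    have hkeq : k = j0 := by omega
    subst hkeq
    have hk : k < a.length := hj0
    rw [PySem.List.pyRange_one_cons (by exact_mod_cast hk)]
    simp only [innerA, PySem.List.pyGetD_natCast]
    rw [if_pos hx]
    have h1 : k + 1 - k = 0 + 1 := by omega
    rw [h1, List.drop_eq_getElem_cons hk, List.take_succ_cons, List.take_zero,
      List.getD_eq_getElem a 0 hk]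
  | succ t ih =>
    intro k seg j0 ht hkj hj0 hx hmin
    have hk : k < a.length := by omega
    rw [PySem.List.pyRange_one_cons (by exact_mod_cast hk)]
    simp only [innerA, PySem.List.pyGetD_natCast]
    rw [if_neg (hmin k (le_refl _) (by omega))]
    have hcast : (k : Int) + 1 = ((k + 1 : Nat) : Int) := by push_cast; ring
    rw [hcast, ih (k+1) _ j0 (by omega) (by omega) hj0 hx
      (fun m hm1 hm2 => hmin m (by omega) hm2)]
    congr 1
    rw [List.append_assoc, List.singleton_append,
      List.drop_eq_getElem_cons hk, List.getD_eq_getElem a 0 hk]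
    have h2 : j0 + 1 - k = (j0 + 1 - (k+1)) + 1 := by omega
    rw [h2, List.take_succ_cons]

theorem segOf_length (a : List Int) (i j : Nat) (h : isPair a i j) :
    (segOf a (i, j)).length = j + 1 - i := by
  obtain ⟨h1, h2, -, -⟩ := h
  simp only [segOf, List.length_take, List.length_drop]
  omega

theorem segOf_head (a : List Int) (i j : Nat) (h : isPair a i j) :
    (segOf a (i, j)).getD 0 0 = a.getD i 0 := by
  obtain ⟨h1, h2, -, -⟩ := h
  have hi : i < a.length := by omega
  simp only [segOf]
  have h3 : j + 1 - i = (j - i) + 1 := by omega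
  rw [h3, List.drop_eq_getElem_cons hi, List.take_succ_cons, List.getD_eq_getElem a 0 hi]
  rfl

theorem segOf_ne_nil (a : List Int) (i j : Nat) (h : isPair a i j) : segOf a (i, j) ≠ [] := by
  have := segOf_length a i j h
  intro hnil
  rw [hnil] at this
  obtain ⟨h1, -, -, -⟩ := h
  simp at this
  omega

-- A's list d is exactly the segments of the (i, next i) pairs, in i order
theorem dA_eq (a : List Int) :
    (PySem.List.pyRange 0 (a.length : Int) 1).foldl
      (fun d i =>
        match innerA a (PySem.List.pyGetD a i 0) (PySem.List.pyRange (i+1) (a.length : Int) 1)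
            [PySem.List.pyGetD a i 0] with
        | some s => d ++ [s]
        | none => d) []
      = (pairsA a).map (segOf a) := by
  refine (foldl_match_filterMap
    (fun i => innerA a (PySem.List.pyGetD a i 0)
      (PySem.List.pyRange (i+1) (a.length : Int) 1) [PySem.List.pyGetD a i 0])
    (fun d i => match innerA a (PySem.List.pyGetD a i 0)
        (PySem.List.pyRange (i+1) (a.length : Int) 1) [PySem.List.pyGetD a i 0] with
      | some s => d ++ [s]
      | none => d)
    (fun d i => by
      cases hx : innerA a (PySem.List.pyGetD a i 0)
        (PySem.List.pyRange (i+1) (a.length : Int) 1) [PySem.List.pyGetD a i 0] <;>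
        simp [hx]) _ []).trans ?_
  rw [List.nil_append]
  have hr : PySem.List.pyRange 0 (a.length : Int) 1
      = (List.range a.length).map (fun k : Nat => (k : Int)) := by
    rw [PySem.List.pyRange_one]; simp
  rw [hr, List.filterMap_map]
  unfold pairsA
  rw [List.map_filterMap]
  apply List.filterMap_congr
  intro i hi
  have hi' : i < a.length := List.mem_range.mp hi
  simp only [Function.comp, Option.map_map, PySem.List.pyGetD_natCast]
  have hc : ((i : Int) + 1) = ((i + 1 : Nat) : Int) := by push_cast; ring
  rw [hc]
  cases h : nxtN a i with
  | none =>
    simp only [Option.map_none]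
    exact innerA_eq_none a (a.getD i 0) (a.length - (i+1)) (i+1) _ rfl
      (fun j hj1 hj2 => (nxtN_eq_none_iff a i).mp h j (by omega) hj2)
  | some j =>
    obtain ⟨hij, hjn, hje, hmin⟩ := (nxtN_eq_some_iff a i j).mp h
    rw [innerA_eq_some a (a.getD i 0) (j - (i+1)) (i+1) _ j rfl (by omega) hjn hje
      (fun m hm1 hm2 => hmin m (by omega) hm2)]
    simp only [Option.map_some]
    congr 1
    unfold segOf
    show [a.getD i 0] ++ List.take (j + 1 - (i + 1)) (List.drop (i + 1) a)
      = List.take (j + 1 - i) (List.drop i a)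
    rw [List.drop_eq_getElem_cons hi', ← List.getD_eq_getElem a 0 hi']
    have h3 : j + 1 - i = (j + 1 - (i+1)) + 1 := by omega
    rw [h3, List.take_succ_cons, List.singleton_append]

-- the f loop: under a constant prefix it keeps collecting while the run continues
theorem floopA_run (e : List Int) (e0 : Int) :
    ∀ (t k : Nat) (f : List Int), t = e.length - k → 1 ≤ k → (∀ m, m < k → e.getD m 0 = e0) →
      floopA e (PySem.List.pyRange (k : Int) (e.length : Int) 1) f
        = f ++ (e.drop k).takeWhile (fun y => y == e0) := by
  intro t
  induction t with
  | zero =>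
    intro k f ht hk hpre
    have hlen : e.length ≤ k := by omega
    rw [PySem.List.pyRange_one_eq_nil (by exact_mod_cast hlen), List.drop_eq_nil_of_le hlen]
    simp [floopA]
  | succ t ih =>
    intro k f ht hk hpre
    have hklen : k < e.length := by omega
    rw [PySem.List.pyRange_one_cons (by exact_mod_cast hklen)]
    simp only [floopA]
    have hk1 : ((k : Int) - 1) = ((k - 1 : Nat) : Int) := by
      have : (1:Nat) ≤ k := hk
      push_cast [this]; ring
    rw [hk1]
    simp only [PySem.List.pyGetD_natCast]
    rw [hpre (k-1) (by omega)]
    by_cases he : e.getD k 0 = e0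
    · rw [if_neg (fun hne => hne he.symm)]
      have hc : ((k : Int) + 1) = ((k + 1 : Nat) : Int) := by push_cast; ring
      rw [hc, ih (k+1) _ (by omega) (by omega) (fun m hm => by
        rcases Nat.lt_succ_iff_lt_or_eq.mp hm with hm' | rfl
        · exact hpre m hm'
        · exact he)]
      rw [List.drop_eq_getElem_cons hklen, List.takeWhile_cons,
        ← List.getD_eq_getElem e 0 hklen]
      have hq : (e.getD k 0 == e0) = true := by simp only [beq_iff_eq]; exact he
      rw [hq]
      simp
    · rw [if_pos (fun heq => he heq.symm)]
      rw [List.drop_eq_getElem_cons hklen, List.takeWhile_cons,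
        ← List.getD_eq_getElem e 0 hklen]
      have hq : (e.getD k 0 == e0) = false := by
        simp only [beq_eq_false_iff_ne, ne_eq]; exact he
      rw [hq, if_neg Bool.false_ne_true]
      simp

-- B-side: the dict pass produces exactly the (last previous occurrence, occurrence) pairs, in j order
theorem bfold_eq (a : List Int) :
    ∀ (t m : Nat) (last : PySem.Dict Int Int) (pairs : List (Int × Int)),
      t = a.length - m → m ≤ a.length →
      (∀ v : Int, last.contains v = true ↔ ∃ i, i < m ∧ a.getD i 0 = v) →
      (∀ (i : Nat) (v : Int), i < m → a.getD i 0 = v → (∀ i', i < i' → i' < m → a.getD i' 0 ≠ v) →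
        last.getD v 0 = (i : Int)) →
      ((PySem.List.enumerate (a.drop m) (m : Int)).foldl bstep (last, pairs)).2
        = pairs ++ (List.range' m (a.length - m)).filterMap
            (fun j => (prevN a j).map (fun i : Nat => ((i : Int), (j : Int)))) := by
  intro t
  induction t with
  | zero =>
    intro m last pairs ht hm h1 h2
    have hm' : m = a.length := by omega
    subst hm'
    simp [List.drop_length, PySem.List.enumerate_nil]
  | succ t ih =>
    intro m last pairs ht hm h1 h2
    have hmn : m < a.length := by omega
    rw [List.drop_eq_getElem_cons hmn, ← List.getD_eq_getElem a 0 hmn,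
      PySem.List.enumerate_cons, List.foldl_cons]
    have hrange : a.length - m = (a.length - (m+1)) + 1 := by omega
    rw [hrange, List.range'_succ, List.filterMap_cons]
    have hcastm : (m : Int) + 1 = ((m + 1 : Nat) : Int) := by push_cast; ring
    by_cases hc : ∃ i, i < m ∧ a.getD i 0 = a.getD m 0
    · -- the value was seen before: a pair is emitted
      have hctrue : last.contains (a.getD m 0) = true := (h1 _).mpr hc
      obtain ⟨i0, hp⟩ : ∃ i0, prevN a m = some i0 := by
        cases hp : prevN a m with
        | some i0 => exact ⟨i0, rfl⟩
        | none =>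
          obtain ⟨i, hi, he⟩ := hc
          exact absurd he ((prevN_eq_none_iff a m).mp hp i hi)
      obtain ⟨hi0m, -, hie, hmin⟩ := (prevN_eq_some_iff a i0 m hmn).mp hp
      have hgd : last.getD (a.getD m 0) 0 = (i0 : Int) := by
        refine h2 i0 _ hi0m hie.symm (fun i' hii' hi'm he' => ?_)
        exact hmin i' hii' hi'm (by rw [he', hie])
      have hstep : bstep (last, pairs) ((m : Int), a.getD m 0)
          = (last.insert (a.getD m 0) (m : Int), pairs ++ [((i0 : Int), (m : Int))]) := by
        simp only [bstep, hctrue, if_pos, hgd]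
      rw [hstep, hp]
      simp only [Option.map_some]
      rw [hcastm, ih (m+1) _ _ (by omega) (by omega) ?_ ?_]
      · rw [List.append_assoc, List.singleton_append]
      · -- contains invariant after insert
        intro w
        rw [PySem.Dict.contains_insert]
        constructor
        · intro hw
          rcases Bool.or_eq_true_iff.mp hw with hw | hw
          · exact ⟨m, by omega, (beq_iff_eq.mp hw).symm⟩
          · obtain ⟨i, hi, he⟩ := (h1 w).mp hw
            exact ⟨i, by omega, he⟩
        · rintro ⟨i, hi, he⟩
          rcases Nat.lt_succ_iff_lt_or_eq.mp hi with hi' | rfl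
          · exact Bool.or_eq_true_iff.mpr (Or.inr ((h1 w).mpr ⟨i, hi', he⟩))
          · exact Bool.or_eq_true_iff.mpr (Or.inl (beq_iff_eq.mpr he.symm))
      · -- last-occurrence invariant after insert
        intro i w hi hw hno
        rw [PySem.Dict.getD_insert]
        by_cases hwv : w = a.getD m 0
        · have him : i = m := by
            by_contra hne
            exact hno m (by omega) (by omega) (by rw [← hwv])
          rw [if_pos hwv, him]
        · have him : i ≠ m := fun he => hwv (by rw [← hw, he])
          rw [if_neg hwv]
          exact h2 i w (by omega) hw (fun i' h1' h2' => hno i' h1' (by omega))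
    · -- first occurrence: no pair
      have hcfalse : last.contains (a.getD m 0) = false := by
        cases hcb : last.contains (a.getD m 0)
        · rfl
        · exact absurd ((h1 _).mp hcb) hc
      have hpnone : prevN a m = none :=
        (prevN_eq_none_iff a m).mpr (fun i hi he => hc ⟨i, hi, he⟩)
      have hstep : bstep (last, pairs) ((m : Int), a.getD m 0)
          = (last.insert (a.getD m 0) (m : Int), pairs) := by
        simp only [bstep, hcfalse]
        simp
      rw [hstep, hpnone]
      simp only [Option.map_none]
      rw [hcastm, ih (m+1) _ _ (by omega) (by omega) ?_ ?_]
      · intro w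
        rw [PySem.Dict.contains_insert]
        constructor
        · intro hw
          rcases Bool.or_eq_true_iff.mp hw with hw | hw
          · exact ⟨m, by omega, (beq_iff_eq.mp hw).symm⟩
          · obtain ⟨i, hi, he⟩ := (h1 w).mp hw
            exact ⟨i, by omega, he⟩
        · rintro ⟨i, hi, he⟩
          rcases Nat.lt_succ_iff_lt_or_eq.mp hi with hi' | rfl
          · exact Bool.or_eq_true_iff.mpr (Or.inr ((h1 w).mpr ⟨i, hi', he⟩))
          · exact Bool.or_eq_true_iff.mpr (Or.inl (beq_iff_eq.mpr he.symm))
      · intro i w hi hw hno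
        rw [PySem.Dict.getD_insert]
        by_cases hwv : w = a.getD m 0
        · have him : i = m := by
            by_contra hne
            exact hno m (by omega) (by omega) (by rw [← hwv])
          rw [if_pos hwv, him]
        · have him : i ≠ m := fun he => hwv (by rw [← hw, he])
          rw [if_neg hwv]
          exact h2 i w (by omega) hw (fun i' h1' h2' => hno i' h1' (by omega))

theorem pairs_alt_eq (a : List Int) :
    ((PySem.List.enumerate a 0).foldl bstep (PySem.Dict.empty, [])).2
      = (pairsB a).map (fun p => ((p.1 : Int), (p.2 : Int))) := by
  have h0 : (PySem.List.enumerate a 0) = (PySem.List.enumerate (a.drop 0) ((0 : Nat) : Int)) := by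
    simp
  rw [h0, bfold_eq a (a.length - 0) 0 PySem.Dict.empty [] rfl (by omega)
    (fun v => by simp [PySem.Dict.contains_empty])
    (fun i v hi => by omega)]
  rw [List.nil_append]
  unfold pairsB
  rw [List.map_filterMap, List.range_eq_range', Nat.sub_zero]
  apply List.filterMap_congr
  intro j _
  rw [Option.map_map]
  rfl


-- evaluating the tail of port A (everything after d) for a nonempty, length-sorted ds
theorem map_pyGetD_range_take {α : Type} (l : List α) (dflt : α) (k : Nat) (hk : k ≤ l.length) :
    (PySem.List.pyRange 0 (k : Int) 1).map (fun i => PySem.List.pyGetD l i dflt) = l.take k := by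
  rw [PySem.List.pyRange_one]
  have h1 : (((k : Int) - 0)).toNat = k := by omega
  rw [h1, List.map_map]
  rw [List.map_congr_left (g := fun n : Nat => l.getD n dflt) (fun n _ => by
    simp [PySem.List.pyGetD_natCast])]
  exact map_getD_range l dflt k hk

theorem map_pyGetD_head_range (l : List (List Int)) :
    (PySem.List.pyRange 0 (l.length : Int) 1).map
      (fun i => PySem.List.pyGetD (PySem.List.pyGetD l i []) 0 0)
    = l.map (fun s => s.getD 0 0) := by
  rw [PySem.List.pyRange_one]
  have h1 : (((l.length : Int) - 0)).toNat = l.length := by omega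
  rw [h1, List.map_map]
  rw [List.map_congr_left (g := fun n : Nat => (l.getD n []).getD 0 0) (fun n hn => by
    simp [PySem.List.pyGetD_natCast, PySem.List.pyGetD_zero])]
  have h2 : (fun n : Nat => (l.getD n []).getD 0 0)
      = (fun s : List Int => s.getD 0 0) ∘ (fun n : Nat => l.getD n []) := rfl
  rw [h2, ← List.map_map, map_getD_range l [] l.length (le_refl _), List.take_length]

theorem floopA_run1 (e : List Int) (e0 : Int) (f : List Int) (hpre : e.getD 0 0 = e0) :
    floopA e (PySem.List.pyRange 1 (e.length : Int) 1) f
      = f ++ (e.drop 1).takeWhile (fun y => y == e0) := by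
  have h := floopA_run e e0 (e.length - 1) 1 f rfl (le_refl 1)
    (fun m hm => by
      have hm0 : m = 0 := by omega
      subst hm0
      exact hpre)
  simpa using h

theorem takeWhile_map_len (p : Int → Bool) :
    ∀ (l : List (List Int)), (l.map (fun s : List Int => (s.length : Int))).takeWhile p
      = (l.takeWhile (fun s : List Int => p (s.length : Int))).map
          (fun s : List Int => (s.length : Int)) := by
  intro l
  induction l with
  | nil => simp
  | cons x xs ih =>
    rw [List.map_cons, List.takeWhile_cons, List.takeWhile_cons]
    cases p (x.length : Int) <;> simp [ih]

theorem tailA_eval (ds : List (List Int)) (s0 : List Int) (dt : List (List Int))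
    (hds : ds = s0 :: dt)
    (hpw : ds.Pairwise (fun a b => (b.length : Int) ≤ (a.length : Int))) :
    (PySem.List.pyRange 0 (((PySem.List.pyRange 0 ((floopA (ds.foldl (fun e i => e ++ [(i.length : Int)]) []) (PySem.List.pyRange 1 ((ds.foldl (fun e i => e ++ [(i.length : Int)]) []).length : Int) 1) [PySem.List.pyGetD (ds.foldl (fun e i => e ++ [(i.length : Int)]) []) 0 0]).length : Int) 1).foldl (fun g i => g ++ [PySem.List.pyGetD ds i []]) []).length : Int) 1).foldl
      (fun r i => r ++ [PySem.List.pyGetD (PySem.List.pyGetD (PySem.List.sorted ((PySem.List.pyRange 0 ((floopA (ds.foldl (fun e i => e ++ [(i.length : Int)]) []) (PySem.List.pyRange 1 ((ds.foldl (fun e i => e ++ [(i.length : Int)]) []).length : Int) 1) [PySem.List.pyGetD (ds.foldl (fun e i => e ++ [(i.length : Int)]) []) 0 0]).length : Int) 1).foldl (fun g i => g ++ [PySem.List.pyGetD ds i []]) []) (fun x => x) false) i []) 0 0]) []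
    = (PySem.List.sorted (ds.filter (fun s => (s.length : Int) == (s0.length : Int)))
        (fun x => x) false).map (fun s => s.getD 0 0) := by
  rw [PySem.List.foldl_append_singleton_eq_map (fun s : List Int => (s.length : Int)) ds [],
    List.nil_append]
  have hds' : ds.map (fun s : List Int => (s.length : Int))
      = (s0.length : Int) :: dt.map (fun s : List Int => (s.length : Int)) := by
    rw [hds, List.map_cons]
  have he0 : PySem.List.pyGetD (ds.map (fun s : List Int => (s.length : Int))) 0 0
      = (s0.length : Int) := by
    rw [PySem.List.pyGetD_zero, hds']
    rfl
  rw [he0]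
  rw [floopA_run1 (ds.map (fun s : List Int => (s.length : Int))) (s0.length : Int) _
    (by rw [hds']; rfl)]
  have hf : ([(s0.length : Int)] ++
      ((ds.map (fun s : List Int => (s.length : Int))).drop 1).takeWhile
        (fun y => y == (s0.length : Int)))
      = (ds.takeWhile (fun s : List Int => (s.length : Int) == (s0.length : Int))).map
          (fun s : List Int => (s.length : Int)) := by
    rw [← takeWhile_map_len (fun y => y == (s0.length : Int)) ds, hds']
    rw [List.takeWhile_cons]
    simp
  rw [hf]
  have hlen1 : ((ds.takeWhile (fun s : List Int => (s.length : Int) == (s0.length : Int))).map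
      (fun s : List Int => (s.length : Int))).length
      = (ds.takeWhile (fun s : List Int => (s.length : Int) == (s0.length : Int))).length := by
    rw [List.length_map]
  rw [hlen1]
  rw [PySem.List.foldl_append_singleton_eq_map (fun i : Int => PySem.List.pyGetD ds i []) _ [],
    List.nil_append]
  rw [map_pyGetD_range_take ds []
    (ds.takeWhile (fun s : List Int => (s.length : Int) == (s0.length : Int))).length
    ((List.takeWhile_prefix _).length_le)]
  rw [List.prefix_iff_eq_take.mp (List.takeWhile_prefix _) |>.symm]
  have hbound : ∀ x ∈ ds, (x.length : Int) ≤ (s0.length : Int) := by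
    intro x hx
    rw [hds] at hx hpw
    rcases List.mem_cons.mp hx with rfl | hx'
    · exact le_refl _
    · exact (List.pairwise_cons.mp hpw).1 x hx'
  rw [takeWhile_eq_filter_of_pairwise (fun s : List Int => (s.length : Int)) (s0.length : Int)
    ds hpw hbound]
  rw [PySem.List.foldl_append_singleton_eq_map
    (fun i : Int => PySem.List.pyGetD (PySem.List.pyGetD
      (PySem.List.sorted (ds.filter (fun s => (s.length : Int) == (s0.length : Int)))
        (fun x => x) false) i []) 0 0) _ [], List.nil_append]
  have hlen2 : ((ds.filter (fun s => (s.length : Int) == (s0.length : Int))).length : Int)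
      = (((PySem.List.sorted (ds.filter (fun s => (s.length : Int) == (s0.length : Int)))
          (fun x => x) false)).length : Int) := by
    rw [PySem.List.length_sorted]
  rw [hlen2, map_pyGetD_head_range]

-- ===== VERDICT (by name: the statement is the Claim_ definition above) =====
theorem max_separator_spec : Claim_equal_max_separator := by
  intro lst _
  unfold Spec_max_separator
  have hclen : ((PySem.List.pyRange 0 (lst.length : Int) 1).foldl
      (fun c _p => c ++ [([] : List Int)]) ([] : List (List Int))).length = lst.length := by
    rw [PySem.List.foldl_append_singleton_eq_map (fun _ : Int => ([] : List Int)) _ [],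
      List.nil_append, List.length_map, PySem.List.length_pyRange_one]
    omega
  by_cases hA : pairsA lst = []
  · -- no repeated value: both return []
    have hB : pairsB lst = [] := by
      have h := pairsA_perm_pairsB lst
      rw [hA] at h
      exact h.symm.eq_nil
    have hAval : max_separator lst = [] := by
      simp only [max_separator]
      rw [hclen, dA_eq lst, hA]
      simp
    have hBval : max_separator_alt lst = [] := by
      simp only [max_separator_alt]
      rw [pairs_alt_eq lst, hB]
      simp
    rw [hAval, hBval]
  · -- at least one pair
    have hB : pairsB lst ≠ [] := by
      intro h
      have h2 := pairsA_perm_pairsB lst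
      rw [h] at h2
      exact hA h2.eq_nil
    -- evaluate port A
    have hdne : (pairsA lst).map (segOf lst) ≠ [] := by
      simp only [ne_eq, List.map_eq_nil_iff]
      exact hA
    have hdsne : PySem.List.sorted ((pairsA lst).map (segOf lst))
        (fun s => (s.length : Int)) true ≠ [] := by
      rw [ne_eq, PySem.List.sorted_eq_nil_iff]
      exact hdne
    obtain ⟨s0, dt, hds⟩ : ∃ s0 dt, PySem.List.sorted ((pairsA lst).map (segOf lst))
        (fun s => (s.length : Int)) true = s0 :: dt := by
      cases hc : PySem.List.sorted ((pairsA lst).map (segOf lst))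
          (fun s => (s.length : Int)) true with
      | nil => exact absurd hc hdsne
      | cons s0 dt => exact ⟨s0, dt, rfl⟩
    have hpw := PySem.List.sorted_pairwise_rev ((pairsA lst).map (segOf lst))
      (fun s : List Int => (s.length : Int))
    have hAval : max_separator lst
        = (PySem.List.sorted ((PySem.List.sorted ((pairsA lst).map (segOf lst))
              (fun s => (s.length : Int)) true).filter
            (fun s => (s.length : Int) == (s0.length : Int))) (fun x => x) false).map
          (fun s => s.getD 0 0) := by
      simp only [max_separator]
      rw [hclen, dA_eq lst]
      rw [if_neg (by simp only [List.length_map, List.length_eq_zero_iff]; exact hA)]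
      exact tailA_eval _ s0 dt hds hpw
    -- evaluate port B
    obtain ⟨b, hb⟩ : ∃ b, PySem.List.max?
        ((((pairsB lst).map (fun p => ((p.1 : Int), (p.2 : Int)))).map
          (fun p : Int × Int => p.2 - p.1))) (fun x => x) = some b := by
      cases hmx : PySem.List.max?
          ((((pairsB lst).map (fun p => ((p.1 : Int), (p.2 : Int)))).map
            (fun p : Int × Int => p.2 - p.1))) (fun x => x) with
      | some b => exact ⟨b, rfl⟩
      | none =>
        rw [PySem.List.max?_eq_none_iff] at hmx
        simp only [List.map_eq_nil_iff] at hmx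
        exact absurd hmx hB
    have hBval : max_separator_alt lst
        = PySem.List.sorted ((((pairsB lst).map
              (fun p => ((p.1 : Int), (p.2 : Int)))).filter
            (fun p => p.2 - p.1 == b)).map
          (fun p => PySem.List.pyGetD lst p.1 0)) (fun x => x) false := by
      simp only [max_separator_alt]
      rw [pairs_alt_eq lst]
      rw [if_neg (by simp only [List.map_eq_nil_iff]; exact hB)]
      rw [hb, Option.getD_some]
    rw [hAval, hBval]
    -- abbreviations (plain hypotheses, no new defs)
    have hlen_cast : ∀ q ∈ pairsA lst, ((segOf lst q).length : Int)
        = (q.2 : Int) - (q.1 : Int) + 1 := by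
      intro q hq
      obtain ⟨i, j⟩ := q
      have hp := (mem_pairsA lst (i, j)).mp hq
      rw [segOf_length lst i j hp]
      obtain ⟨h1, -, -, -⟩ := hp
      rw [Nat.cast_sub (by omega : i ≤ j + 1)]
      push_cast
      ring
    -- names used below: dA := (pairsA lst).map (segOf lst), M := (s0.length : Int)
    have hs0mem : s0 ∈ (pairsA lst).map (segOf lst) := by
      have hm : s0 ∈ PySem.List.sorted ((pairsA lst).map (segOf lst))
          (fun s => (s.length : Int)) true := by
        rw [hds]
        exact List.mem_cons_self
      exact (PySem.List.mem_sorted _ _ _ _).mp hm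
    have hgaps : (((pairsB lst).map (fun p => ((p.1 : Int), (p.2 : Int)))).map
        (fun p : Int × Int => p.2 - p.1))
        = (pairsB lst).map (fun q => (q.2 : Int) - (q.1 : Int)) := by
      rw [List.map_map]
      rfl
    have hb_mem := PySem.List.max?_mem hb
    have hb_max := PySem.List.max?_isMax hb
    rw [hgaps] at hb_mem hb_max
    have hMle : (s0.length : Int) ≤ b + 1 := by
      obtain ⟨q, hq, hqs⟩ := List.mem_map.mp hs0mem
      have hgap : (q.2 : Int) - (q.1 : Int)
          ∈ (pairsB lst).map (fun q => (q.2 : Int) - (q.1 : Int)) :=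
        List.mem_map_of_mem ((mem_pairsB lst q).mpr ((mem_pairsA lst q).mp hq))
      have hle := hb_max _ hgap
      rw [← hqs, hlen_cast q hq]
      simpa using by omega
    have hble : b + 1 ≤ (s0.length : Int) := by
      obtain ⟨q, hq, hqb⟩ := List.mem_map.mp hb_mem
      have hqA : q ∈ pairsA lst := (mem_pairsA lst q).mpr ((mem_pairsB lst q).mp hq)
      have hbound : ((segOf lst q).length : Int) ≤ (s0.length : Int) := by
        have hmem' : segOf lst q ∈ PySem.List.sorted ((pairsA lst).map (segOf lst))
            (fun s => (s.length : Int)) true :=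
          (PySem.List.mem_sorted _ _ _ _).mpr (List.mem_map_of_mem hqA)
        rw [hds] at hmem' hpw
        rcases List.mem_cons.mp hmem' with heq | hx'
        · rw [heq]
        · exact (List.pairwise_cons.mp hpw).1 _ hx'
      rw [hlen_cast q hqA] at hbound
      omega
    have hMb : ((s0.length : Nat) : Int) = b + 1 := le_antisymm hMle hble
    -- canonical form of B's inner list
    have hLB : ((((pairsB lst).map (fun p => ((p.1 : Int), (p.2 : Int)))).filter
          (fun p => p.2 - p.1 == b)).map (fun p => PySem.List.pyGetD lst p.1 0))
        = ((pairsB lst).filter (fun q => (q.2 : Int) - (q.1 : Int) == b)).map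
            (fun q => lst.getD q.1 0) := by
      rw [List.filter_map, List.map_map]
      have h1 : List.filter ((fun p : Int × Int => p.2 - p.1 == b)
            ∘ (fun p : Nat × Nat => ((p.1 : Int), (p.2 : Int)))) (pairsB lst)
          = List.filter (fun q : Nat × Nat => (q.2 : Int) - (q.1 : Int) == b) (pairsB lst) :=
        List.filter_congr (fun q _ => rfl)
      rw [h1]
      exact List.map_congr_left (fun q _ => by simp [PySem.List.pyGetD_natCast])
    rw [hLB]
    -- both sides are nondecreasing rearrangements of the same multiset of start values
    have hne_mem : ∀ x ∈ (PySem.List.sorted ((pairsA lst).map (segOf lst))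
        (fun s => (s.length : Int)) true).filter
          (fun s => (s.length : Int) == (s0.length : Int)), x ≠ [] := by
      intro x hx
      have h1 : x ∈ (pairsA lst).map (segOf lst) :=
        (PySem.List.mem_sorted _ _ _ _).mp (List.mem_filter.mp hx).1
      obtain ⟨q, hq, hqs⟩ := List.mem_map.mp h1
      obtain ⟨i, j⟩ := q
      rw [← hqs]
      exact segOf_ne_nil lst i j ((mem_pairsA lst (i, j)).mp hq)
    have hpw1 : (((PySem.List.sorted ((PySem.List.sorted ((pairsA lst).map (segOf lst))
        (fun s => (s.length : Int)) true).filter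
          (fun s => (s.length : Int) == (s0.length : Int))) (fun x => x) false).map
        (fun s => s.getD 0 0)).Pairwise (· ≤ ·)) := by
      rw [List.pairwise_map,
        sorted_instIrrel (fun (a b : List Int) => a.decidableLT b)
          (@LinearOrder.toDecidableLT _ List.instLinearOrder) _ (fun x => x) false]
      have hlex := PySem.List.sorted_pairwise
        ((PySem.List.sorted ((pairsA lst).map (segOf lst)) (fun s => (s.length : Int)) true).filter
          (fun s => (s.length : Int) == (s0.length : Int))) (fun x : List Int => x)
      exact hlex.imp_of_mem
        (fun {x y} hx hy hxy => head_le_of_lex_le x y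
          (hne_mem x ((@PySem.List.mem_sorted (List Int) (List Int) List.instLT
            (@LinearOrder.toDecidableLT _ List.instLinearOrder) _ _ _ _).mp hx))
          (hne_mem y ((@PySem.List.mem_sorted (List Int) (List Int) List.instLT
            (@LinearOrder.toDecidableLT _ List.instLinearOrder) _ _ _ _).mp hy)) hxy)
    have hpw2 : ((PySem.List.sorted (((pairsB lst).filter
        (fun q => (q.2 : Int) - (q.1 : Int) == b)).map (fun q => lst.getD q.1 0))
        (fun x => x) false).Pairwise (· ≤ ·)) :=
      PySem.List.sorted_pairwise _ (fun x : Int => x)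
    -- the permutation chain
    have p1 : ((PySem.List.sorted ((PySem.List.sorted ((pairsA lst).map (segOf lst))
        (fun s => (s.length : Int)) true).filter
          (fun s => (s.length : Int) == (s0.length : Int))) (fun x => x) false).map
        (fun s => s.getD 0 0)).Perm
        ((((pairsA lst).map (segOf lst)).filter
          (fun s => (s.length : Int) == (s0.length : Int))).map (fun s => s.getD 0 0)) :=
      ((PySem.List.sorted_perm _ _ false).trans
        ((PySem.List.sorted_perm _ _ true).filter _)).map _
    have p3 : ((((pairsA lst).map (segOf lst)).filter
          (fun s => (s.length : Int) == (s0.length : Int))).map (fun s => s.getD 0 0))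
        = (((pairsA lst).filter (fun q => (q.2 : Int) - (q.1 : Int) == b)).map
            (fun q => lst.getD q.1 0)) := by
      rw [List.filter_map, List.map_map]
      have h1 : List.filter ((fun s : List Int => (s.length : Int) == (s0.length : Int))
            ∘ segOf lst) (pairsA lst)
          = List.filter (fun q : Nat × Nat => (q.2 : Int) - (q.1 : Int) == b) (pairsA lst) := by
        apply List.filter_congr
        intro q hq
        have h2 : ((fun s : List Int => (s.length : Int) == (s0.length : Int)) ∘ segOf lst) q
            = (((segOf lst q).length : Int) == ((s0.length : Nat) : Int)) := rfl
        rw [h2, hlen_cast q hq, hMb]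
        rw [Bool.eq_iff_iff]
        simp only [beq_iff_eq]
        omega
      rw [h1]
      apply List.map_congr_left
      intro q hq
      have hqA : q ∈ pairsA lst := (List.mem_filter.mp hq).1
      obtain ⟨i, j⟩ := q
      exact segOf_head lst i j ((mem_pairsA lst (i, j)).mp hqA)
    have p5 : (((pairsA lst).filter (fun q => (q.2 : Int) - (q.1 : Int) == b)).map
          (fun q => lst.getD q.1 0)).Perm
        ((((pairsB lst).filter (fun q => (q.2 : Int) - (q.1 : Int) == b)).map
          (fun q => lst.getD q.1 0))) :=
      ((pairsA_perm_pairsB lst).filter _).map _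
    have p6 : ((((pairsB lst).filter (fun q => (q.2 : Int) - (q.1 : Int) == b)).map
          (fun q => lst.getD q.1 0))).Perm
        (PySem.List.sorted (((pairsB lst).filter
          (fun q => (q.2 : Int) - (q.1 : Int) == b)).map (fun q => lst.getD q.1 0))
          (fun x => x) false) :=
      (PySem.List.sorted_perm _ _ false).symm
    exact ((p1.trans (p3 ▸ p5)).trans p6).eq_of_pairwise
      (fun a b _ _ h1 h2 => le_antisymm h1 h2) hpw1 hpw2
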